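-- pv_equiv track=rewrite | github.com/Kasa-wur/algorithms-in-bioinformatics | indexing/assignment2_Xinyuan.py | sortHits
-- ===== SOURCE A (Python) =====
-- def hashTable(seqs, k):
--     """Return a dictionary which contains all k-mers in the subject sequences（key），
--     and their corresponding positions (value). The value is a list containing one
--     or several tuples.
--
--     seqs: a list of multiple strings (subject sequences)
--     k: a positive integer, defines the number of bases in a k-tuple
--
--     this function is to construct a hash table for all k-mers in the subject sequences
--     in the database.
--     """
--     kmer_positions = {}
--     # for i, seq in enumerste(seqs):
--         # kmer_position[seq[j: j+k].append(i+1, j+1)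
--     for i in range(len(seqs)):
--         for j in range(0, len(seqs[i])-k+1, k):
--             # kmer = seqs[i][j:j+k]
--             # add the sliced kmer direct to dictionary, this would save the second slicing time
--             if seqs[i][j:j+k] not in kmer_positions:
--                 kmer_positions[seqs[i][j:j+k]] = []
--             kmer_positions[seqs[i][j:j+k]].append((i+1, j+1))
--     return kmer_positions
--
-- def sortHits(seqs, query, k):
--     """Return a list of tuples in qscending order.
--
--     seqs: a list of multiple strings (subject sequences)
--     query: string
--     k: a positive integer, defines the number of bases in a k-tuple
--
--     to calculate the (index, shift, offset) for each k-mer in the query sequence,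
--     and sort all the hits in ascending order
--     """
--     hash_table = hashTable(seqs, k)
--     hits = []
--     for t in range(len(query) -k+1):
--         # get the positions from hash table for each k-mer in query sequence
--         if query[t:t+k] in hash_table:
--             positions = hash_table[query[t:t+k]]
--             # calculate column M in table 2, hits is a list of list
--             hit = list(map(lambda x: (x[0], x[-1]- t, x[-1]), positions))
--             hits.append(hit)
--     # unpack list of list (hits), return sorted hits list
--     sorted_hits = []
--     for lst in hits:
--         for tup in lst:
--             sorted_hits.append(tup)
--     sorted_hits.sort()
--     return sorted_hits
-- ===== SOURCE B (Python) =====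
-- def sortHits(seqs, query, k):
--     """Brute-force rewrite: no hash table; directly compare each query k-mer
--     (step 1) with each subject k-mer (step k) and collect hits, then sort once."""
--     hits = []
--     for t in range(len(query) - k + 1):
--         for i, seq in enumerate(seqs):
--             for j in range(0, len(seq) - k + 1, k):
--                 if seq[j:j+k] == query[t:t+k]:
--                     hits.append((i + 1, j + 1 - t, j + 1))
--     hits.sort()
--     return hits
-- ===== Notes on version B (the rewrite author's own statement) =====
-- stated objective: simpler
-- what changed: Drops the hashTable dictionary index and the list-of-lists unpacking: B compares each query k-mer directly with each subject k-mer in one triple loop, appending the (index, shift, offset) triples to a flat list and sorting once.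
import Mathlib
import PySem

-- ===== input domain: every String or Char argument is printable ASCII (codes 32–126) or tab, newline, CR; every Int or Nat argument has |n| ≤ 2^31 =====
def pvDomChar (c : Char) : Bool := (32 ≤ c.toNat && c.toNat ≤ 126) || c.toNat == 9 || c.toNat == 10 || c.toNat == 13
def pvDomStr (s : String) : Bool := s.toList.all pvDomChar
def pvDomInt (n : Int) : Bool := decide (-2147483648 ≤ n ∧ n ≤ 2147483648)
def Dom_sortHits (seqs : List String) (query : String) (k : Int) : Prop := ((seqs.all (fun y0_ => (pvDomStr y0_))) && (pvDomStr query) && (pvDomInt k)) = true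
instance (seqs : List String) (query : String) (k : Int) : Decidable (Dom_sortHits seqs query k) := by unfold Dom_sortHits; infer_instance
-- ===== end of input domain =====

-- B drops the hashTable index and the list-of-lists unpacking: it compares each
-- query k-mer directly with each subject k-mer in one triple loop and sorts once
-- (objective: simpler; same results).

-- ===== PORT A =====
def hashTable (seqs : List String) (k : Int) : PySem.Dict String (List (Int × Int)) :=
  (PySem.List.pyRange 0 (PySem.List.len seqs) 1).foldl (fun d i =>
    (PySem.List.pyRange 0 (PySem.Str.len (PySem.List.pyGetD seqs i "") - k + 1) k).foldl (fun d j =>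
      let kmer := PySem.Str.slice (PySem.List.pyGetD seqs i "") (some j) (some (j + k))
      let d' := if d.contains kmer then d else d.insert kmer ([] : List (Int × Int))
      d'.modify kmer [] (fun l => l ++ [(i + 1, j + 1)])) d) PySem.Dict.empty

def sortHits (seqs : List String) (query : String) (k : Int) : List (Int × Int × Int) :=
  let hash_table := hashTable seqs k
  let hits := (PySem.List.pyRange 0 (PySem.Str.len query - k + 1) 1).foldl (fun hits t =>
    if hash_table.contains (PySem.Str.slice query (some t) (some (t + k))) then
      hits ++ [(hash_table.getD (PySem.Str.slice query (some t) (some (t + k))) []).map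
        (fun x => (x.1, x.2 - t, x.2))]
    else hits) ([] : List (List (Int × Int × Int)))
  let sorted_hits := hits.foldl (fun acc lst => lst.foldl (fun acc tup => acc ++ [tup]) acc)
    ([] : List (Int × Int × Int))
  PySem.List.sorted sorted_hits (fun x => [x.1, x.2.1, x.2.2]) false

-- ===== PORT B =====
def sortHits_alt (seqs : List String) (query : String) (k : Int) : List (Int × Int × Int) :=
  let hits := (PySem.List.pyRange 0 (PySem.Str.len query - k + 1) 1).foldl (fun hits t =>
    (PySem.List.enumerate seqs).foldl (fun hits p =>
      (PySem.List.pyRange 0 (PySem.Str.len p.2 - k + 1) k).foldl (fun hits j =>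
        if PySem.Str.slice p.2 (some j) (some (j + k)) == PySem.Str.slice query (some t) (some (t + k)) then
          hits ++ [(p.1 + 1, j + 1 - t, j + 1)]
        else hits) hits) hits) ([] : List (Int × Int × Int))
  PySem.List.sorted hits (fun x => [x.1, x.2.1, x.2.2]) false

-- ===== PRECONDITION & SPEC =====
-- Pre_ excludes only k = 0 with a nonempty subject list: there Python's
-- range(0, len(seqs[i])-k+1, 0) raises ValueError (in A and in B alike).
def Pre_sortHits (seqs : List String) (query : String) (k : Int) : Prop := seqs = [] ∨ k ≠ 0
instance (seqs : List String) (query : String) (k : Int) : Decidable (Pre_sortHits seqs query k) := by unfold Pre_sortHits; infer_instance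
def pvWitness_sortHits : List String × String × Int := (["ACGTAC", "CGCG"], "GTACG", 2)

def Spec_sortHits (seqs : List String) (query : String) (k : Int) (out : List (Int × Int × Int)) : Prop := out = sortHits_alt seqs query k
instance (seqs : List String) (query : String) (k : Int) (out : List (Int × Int × Int)) : Decidable (Spec_sortHits seqs query k out) := by unfold Spec_sortHits; infer_instance

-- ===== CLAIM (what is proved, stated in full; the proofs are below) =====
def Claim_equal_sortHits : Prop := ∀ (seqs : List String) (query : String) (k : Int), Dom_sortHits seqs query k → Pre_sortHits seqs query k → Spec_sortHits seqs query k (sortHits seqs query k)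

-- ===== LEMMAS AND PROOFS =====

-- subject k-mer start positions for one subject string
def pvJr (s : String) (k : Int) : List Int := PySem.List.pyRange 0 (PySem.Str.len s - k + 1) k

-- one iteration of hashTable's inner loop, over a prepared (key, value) pair
def pvStep (d : PySem.Dict String (List (Int × Int))) (p : String × Int × Int) : PySem.Dict String (List (Int × Int)) :=
  (if d.contains p.1 then d else d.insert p.1 []).modify p.1 [] (fun l => l ++ [p.2])

-- all (key, value) pairs hashTable inserts, in insertion order
def pvPairs (seqs : List String) (k : Int) : List (String × Int × Int) :=
  (PySem.List.enumerate seqs).flatMap (fun q =>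
    (pvJr q.2 k).map (fun j => (PySem.Str.slice q.2 (some j) (some (j + k)), q.1 + 1, j + 1)))

-- the hit triples for one query offset t
def pvHits (seqs : List String) (query : String) (k t : Int) : List (Int × Int × Int) :=
  ((pvPairs seqs k).filter (fun p => p.1 == PySem.Str.slice query (some t) (some (t + k)))).map
    (fun p => (p.2.1, p.2.2 - t, p.2.2))

lemma pvStep_getD (d : PySem.Dict String (List (Int × Int))) (p : String × Int × Int) (c : String) :
    (pvStep d p).getD c [] = if c = p.1 then d.getD c [] ++ [p.2] else d.getD c [] := by
  unfold pvStep
  by_cases h : d.contains p.1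
  · simp only [h, if_true, PySem.Dict.getD_modify]
    split_ifs with hc
    · subst hc; rfl
    · rfl
  · simp only [h, if_false, Bool.false_eq_true, PySem.Dict.getD_modify, PySem.Dict.getD_insert]
    split_ifs with hc
    · subst hc
      have h' : d.contains p.1 = false := by simpa using h
      simp [PySem.Dict.getD_of_not_contains d ([] : List (Int × Int)) h']
    · rfl

lemma pvStep_contains (d : PySem.Dict String (List (Int × Int))) (p : String × Int × Int) (c : String) :
    (pvStep d p).contains c = (p.1 == c || d.contains c) := by
  unfold pvStep
  have hcc : (c == p.1) = (p.1 == c) := by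
    by_cases hc : c = p.1
    · rw [hc]
    · simp [hc, Ne.symm hc]
  by_cases h : d.contains p.1
  · rw [if_pos h, PySem.Dict.contains_modify, hcc]
  · rw [if_neg (by simp [h]), PySem.Dict.contains_modify, PySem.Dict.contains_insert, hcc]
    cases (p.1 == c) <;> simp

lemma pvFold_getD (l : List (String × Int × Int)) (d : PySem.Dict String (List (Int × Int))) (c : String) :
    (l.foldl pvStep d).getD c [] = d.getD c [] ++ (l.filter (fun p => p.1 == c)).map (fun p => p.2) := by
  induction l generalizing d with
  | nil => simp
  | cons p l ih =>
    rw [List.foldl_cons, ih, pvStep_getD, List.filter_cons]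
    by_cases h : p.1 = c
    · simp [h, List.append_assoc]
    · simp [h, Ne.symm h]

lemma pvFold_contains (l : List (String × Int × Int)) (d : PySem.Dict String (List (Int × Int))) (c : String) :
    (l.foldl pvStep d).contains c = (d.contains c || l.any (fun p => p.1 == c)) := by
  induction l generalizing d with
  | nil => simp
  | cons p l ih =>
    rw [List.foldl_cons, ih, pvStep_contains, List.any_cons]
    cases (p.1 == c) <;> cases (d.contains c) <;> simp

lemma pvHashTable_eq (seqs : List String) (k : Int) :
    hashTable seqs k = (pvPairs seqs k).foldl pvStep PySem.Dict.empty := by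
  unfold hashTable pvPairs pvJr pvStep
  rw [List.foldl_flatMap]
  simp only [List.foldl_map]
  rw [PySem.List.enumerate_eq_map_pyRange seqs ""]
  simp only [List.foldl_map]

lemma pvFlatten_filter_map {α β : Type} (l : List α) (p : α → Bool) (g : α → List β)
    (h : ∀ x ∈ l, p x = false → g x = []) :
    ((l.filter p).map g).flatten = List.flatMap g l := by
  induction l with
  | nil => simp
  | cons x l ih =>
    rw [List.filter_cons, List.flatMap_cons]
    cases hx : p x
    · rw [if_neg (by simp), h x List.mem_cons_self hx, List.nil_append]
      exact ih (fun y hy => h y (List.mem_cons_of_mem _ hy))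
    · rw [if_pos (by simp), List.map_cons, List.flatten_cons,
        ih (fun y hy => h y (List.mem_cons_of_mem _ hy))]

lemma pvA_eq (seqs : List String) (query : String) (k : Int) :
    sortHits seqs query k =
      PySem.List.sorted
        (List.flatMap (fun t => pvHits seqs query k t)
          (PySem.List.pyRange 0 (PySem.Str.len query - k + 1) 1))
        (fun x => [x.1, x.2.1, x.2.2]) false := by
  unfold sortHits
  simp only [pvHashTable_eq, pvFold_contains, pvFold_getD, PySem.Dict.contains_empty,
    PySem.Dict.getD_empty, Bool.false_or, List.nil_append]
  rw [PySem.List.foldl_append_if]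
  simp only [PySem.List.foldl_append_singleton_eq_self]
  rw [PySem.List.foldl_append_eq_flatten, List.nil_append, List.nil_append]
  congr 1
  rw [pvFlatten_filter_map]
  · unfold pvHits
    simp [List.map_map, Function.comp_def]
  · intro t _ ht
    rw [List.any_eq_false] at ht
    simp [List.filter_eq_nil_iff.mpr (fun p hp => ht p hp)]

lemma pvB_eq (seqs : List String) (query : String) (k : Int) :
    sortHits_alt seqs query k =
      PySem.List.sorted
        (List.flatMap (fun t =>
            List.flatMap (fun q =>
                ((pvJr q.2 k).filter (fun j =>
                    PySem.Str.slice q.2 (some j) (some (j + k)) == PySem.Str.slice query (some t) (some (t + k)))).map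
                  (fun j => (q.1 + 1, j + 1 - t, j + 1)))
              (PySem.List.enumerate seqs))
          (PySem.List.pyRange 0 (PySem.Str.len query - k + 1) 1))
        (fun x => [x.1, x.2.1, x.2.2]) false := by
  unfold sortHits_alt pvJr
  simp only [PySem.List.foldl_append_if, PySem.List.foldl_append_eq_flatMap, List.nil_append]

lemma pvHits_eq (seqs : List String) (query : String) (k t : Int) :
    List.flatMap (fun q =>
        ((pvJr q.2 k).filter (fun j =>
            PySem.Str.slice q.2 (some j) (some (j + k)) == PySem.Str.slice query (some t) (some (t + k)))).map
          (fun j => (q.1 + 1, j + 1 - t, j + 1)))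
      (PySem.List.enumerate seqs) = pvHits seqs query k t := by
  unfold pvHits pvPairs
  rw [List.filter_flatMap, List.map_flatMap]
  simp only [List.filter_map, List.map_map, Function.comp_def]

-- ===== VERDICT (by name: the statement is the Claim_ definition above) =====
theorem sortHits_spec : Claim_equal_sortHits := by
  intro seqs query k _ _
  unfold Spec_sortHits
  rw [pvA_eq, pvB_eq]
  exact (congrArg
    (fun f => PySem.List.sorted (List.flatMap f (PySem.List.pyRange 0 (PySem.Str.len query - k + 1) 1))
      (fun x => [x.1, x.2.1, x.2.2]) false)
    (funext fun t => (pvHits_eq seqs query k t))).symm
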